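-- pv_equiv track=rewrite | github.com/reslp/LFS-cazy-comparative | bin/get_functional_for_cafe_families.py | extract_pfam
-- ===== SOURCE A (Python) =====
-- def extract_pfam(ann_str):
-- 	pflist = []
-- 	for annot in ann_str.split(";"):
-- 		if "PFAM" in annot:
-- 			for pfam in annot.split(","):
-- 				if "PFAM" in pfam.split(":")[0]:
-- 					pflist.append(pfam.split(":")[-1])
-- 	return pflist
-- ===== SOURCE B (Python) =====
-- def extract_pfam(ann_str):
-- 	# Character-level state machine: one scan over the characters, no split calls.
-- 	# For the current token (delimited by ';' or ','), 'head' collects the chars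
-- 	# before the first ':' and 'tail' the chars since the most recent ':'; a
-- 	# delimiter (or the appended sentinel ';') flushes the token.
-- 	out = []
-- 	head = []
-- 	tail = []
-- 	seen_colon = False
-- 	for ch in ann_str + ";":
-- 		if ch == ";" or ch == ",":
-- 			if "PFAM" in "".join(head):
-- 				out.append("".join(tail))
-- 			head, tail, seen_colon = [], [], False
-- 		elif ch == ":":
-- 			seen_colon = True
-- 			tail = []
-- 		else:
-- 			if not seen_colon:
-- 				head.append(ch)
-- 			tail.append(ch)
-- 	return out
-- ===== Notes on version B (the rewrite author's own statement) =====
-- stated objective: alternative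
-- what changed: Replaces A's nested split(';')/split(',')/split(':') passes by a single character-level state machine that scans ann_str once, maintaining the current token's pre-first-colon head and post-last-colon tail and flushing on delimiters.
import Mathlib
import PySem

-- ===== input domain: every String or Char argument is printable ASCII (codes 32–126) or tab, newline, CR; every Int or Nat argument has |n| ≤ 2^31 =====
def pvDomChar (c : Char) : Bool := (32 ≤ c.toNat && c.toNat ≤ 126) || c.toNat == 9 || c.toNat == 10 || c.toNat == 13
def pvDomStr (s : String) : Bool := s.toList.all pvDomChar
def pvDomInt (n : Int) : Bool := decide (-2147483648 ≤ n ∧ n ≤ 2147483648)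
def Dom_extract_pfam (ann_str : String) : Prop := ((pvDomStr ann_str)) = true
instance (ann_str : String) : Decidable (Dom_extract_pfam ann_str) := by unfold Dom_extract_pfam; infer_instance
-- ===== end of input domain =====

-- B replaces A's nested split(';')/split(',')/split(':') passes by a single character-level
-- state machine over ann_str (alternative decomposition, same cost).

-- ===== PORT A =====
-- s.split(sep) with the literal nonempty seps ";" "," ":" is always `some`, so `.getD []` is exact;
-- the split result is never empty, so Python's [0] / [-1] are `.headD ""` / `.getLastD ""` exactly.
def extract_pfam (ann_str : String) : List String :=
  ((PySem.Str.split? ann_str ";").getD []).foldl (fun pflist annot =>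
    if PySem.Str.isIn "PFAM" annot then
      ((PySem.Str.split? annot ",").getD []).foldl (fun pflist pfam =>
        if PySem.Str.isIn "PFAM" (((PySem.Str.split? pfam ":").getD []).headD "") then
          pflist ++ [((PySem.Str.split? pfam ":").getD []).getLastD ""]
        else pflist) pflist
    else pflist) []

-- ===== PORT B =====
-- the loop body of Source B: state = (out, head, tail, seen_colon); "".join(l) = String.ofList l
def pvBstep (st : List String × List Char × List Char × Bool) (ch : Char) :
    List String × List Char × List Char × Bool :=
  let (out, head, tail, sc) := st
  if ch = ';' ∨ ch = ',' then
    ((if PySem.Str.isIn "PFAM" (String.ofList head) then out ++ [String.ofList tail] else out),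
      [], [], false)
  else if ch = ':' then (out, head, [], true)
  else (out, (if sc then head else head ++ [ch]), tail ++ [ch], sc)

def extract_pfam_alt (ann_str : String) : List String :=
  ((ann_str ++ ";").toList.foldl pvBstep ([], [], [], false)).1

-- ===== PRECONDITION & SPEC =====
def Spec_extract_pfam (ann_str : String) (out : List String) : Prop := out = extract_pfam_alt ann_str
instance (ann_str : String) (out : List String) : Decidable (Spec_extract_pfam ann_str out) := by unfold Spec_extract_pfam; infer_instance

-- ===== CLAIM (what is proved, stated in full; the proofs are below) =====
def Claim_equal_extract_pfam : Prop := ∀ (ann_str : String), Dom_extract_pfam ann_str → Spec_extract_pfam ann_str (extract_pfam ann_str)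

-- ===== LEMMAS AND PROOFS =====

-- Char-level model of s.split(c) for a single-char separator.
def pvConsH (c : Char) : List (List Char) → List (List Char)
  | [] => [[c]]
  | h :: r => (c :: h) :: r

def pvConsA (p : List Char) : List (List Char) → List (List Char)
  | [] => [p]
  | h :: r => (p ++ h) :: r

def pvSplitC (sep : Char) : List Char → List (List Char)
  | [] => [[]]
  | c :: t => if c = sep then [] :: pvSplitC sep t else pvConsH c (pvSplitC sep t)

def pvSubst (c : Char) : Char := if c = ';' then ',' else c

-- tokens of l split on BOTH ';' and ','
def pvSplit2 : List Char → List (List Char)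
  | [] => [[]]
  | c :: t => if c = ';' ∨ c = ',' then [] :: pvSplit2 t else pvConsH c (pvSplit2 t)

def pvHead (tok : List Char) : List Char := (pvSplitC ':' tok).headD []
def pvLast (tok : List Char) : List Char := (pvSplitC ':' tok).getLastD []
def pvP (tok : List Char) : Bool := PySem.Chars.isIn "PFAM".toList (pvHead tok)
def pvF (tok : List Char) : String := String.ofList (pvLast tok)

-- tail register of the machine over a token
def pvTailF (acc : List Char) (p : List Char) : List Char :=
  p.foldl (fun tl c => if c = ':' then [] else tl ++ [c]) acc

lemma pvSplitC_ne_nil (sep : Char) (l : List Char) : pvSplitC sep l ≠ [] := by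
  cases l with
  | nil => simp [pvSplitC]
  | cons c t =>
    simp only [pvSplitC]
    split
    · simp
    · cases h : pvSplitC sep t <;> simp [pvConsH]

lemma pvSplit2_ne_nil (l : List Char) : pvSplit2 l ≠ [] := by
  cases l with
  | nil => simp [pvSplit2]
  | cons c t =>
    simp only [pvSplit2]
    split
    · simp
    · cases h : pvSplit2 t <;> simp [pvConsH]

lemma pvConsA_nil (x : List (List Char)) (hx : x ≠ []) : pvConsA [] x = x := by
  cases x with
  | nil => exact absurd rfl hx
  | cons h r => simp [pvConsA]

lemma pv_go_single (sep : Char) : ∀ (fuel : Nat) (l cur : List Char) (hacc : List (List Char)),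
    l.length ≤ fuel →
    PySem.Chars.splitOn.go [sep] fuel l cur hacc =
      hacc.reverse ++ pvConsA cur.reverse (pvSplitC sep l) := by
  intro fuel
  induction fuel with
  | zero =>
    intro l cur hacc hl
    have : l = [] := List.eq_nil_of_length_eq_zero (Nat.le_zero.mp hl)
    subst this
    simp [PySem.Chars.splitOn.go, pvSplitC, pvConsA]
  | succ n ih =>
    intro l cur hacc hl
    cases l with
    | nil => simp [PySem.Chars.splitOn.go, pvSplitC, pvConsA]
    | cons c rest =>
      have hpre : List.isPrefixOf [sep] (c :: rest) = (sep == c) := by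
        simp [List.isPrefixOf]
      rw [PySem.Chars.splitOn.go]
      rw [hpre]
      by_cases hc : sep = c
      · subst hc
        simp only [beq_self_eq_true, if_true, List.length_cons] at *
        have hdrop : List.drop (([] : List Char).length + 1) (sep :: rest) = rest := by simp
        rw [hdrop, ih rest [] (cur.reverse :: hacc) (by omega)]
        simp only [List.reverse_cons, List.reverse_nil]
        rw [pvConsA_nil _ (pvSplitC_ne_nil sep rest)]
        have : pvSplitC sep (sep :: rest) = [] :: pvSplitC sep rest := by
          simp [pvSplitC]
        rw [this]
        simp [pvConsA]
      · have : (sep == c) = false := by simp [hc]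
        rw [this]
        simp only [Bool.false_eq_true, if_false]
        rw [ih rest (c :: cur) hacc (by have := hl; simp only [List.length_cons] at this; omega)]
        have hcs : ¬ c = sep := fun hh => hc hh.symm
        have : pvSplitC sep (c :: rest) = pvConsH c (pvSplitC sep rest) := by
          simp [pvSplitC, hcs]
        rw [this]
        cases h : pvSplitC sep rest with
        | nil => exact absurd h (pvSplitC_ne_nil sep rest)
        | cons hd r => simp [pvConsA, pvConsH]

lemma pv_splitOn_single (sep : Char) (l : List Char) :
    PySem.Chars.splitOn l [sep] = pvSplitC sep l := by
  rw [PySem.Chars.splitOn, pv_go_single sep (l.length + 1) l [] [] (by omega)]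
  simp [pvConsA_nil _ (pvSplitC_ne_nil sep l)]

lemma pvConsH_append (c : Char) (x y : List (List Char)) (hx : x ≠ []) :
    pvConsH c (x ++ y) = pvConsH c x ++ y := by
  cases x with
  | nil => exact absurd rfl hx
  | cons h r => simp [pvConsH]

-- flattening: splitting the ';'→',' substituted string on ',' = splitting on ';' then each piece on ','
lemma pv_flatten (l : List Char) :
    pvSplitC ',' (l.map pvSubst) = (pvSplitC ';' l).flatMap (pvSplitC ',') := by
  induction l with
  | nil => simp [pvSplitC]
  | cons c t ih =>
    by_cases h1 : c = ';'
    · subst h1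
      have hsub : pvSubst ';' = ',' := rfl
      simp only [List.map_cons, hsub]
      have hl : pvSplitC ',' (',' :: t.map pvSubst) = [] :: pvSplitC ',' (t.map pvSubst) := by
        simp [pvSplitC]
      have hr : pvSplitC ';' (';' :: t) = [] :: pvSplitC ';' t := by simp [pvSplitC]
      rw [hl, hr, ih]
      simp [List.flatMap_cons, pvSplitC]
    · have hsub : pvSubst c = c := by simp [pvSubst, h1]
      simp only [List.map_cons, hsub]
      by_cases h2 : c = ','
      · subst h2
        have hl : pvSplitC ',' (',' :: t.map pvSubst) = [] :: pvSplitC ',' (t.map pvSubst) := by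
          simp [pvSplitC]
        have hr : pvSplitC ';' (',' :: t) = pvConsH ',' (pvSplitC ';' t) := by
          simp [pvSplitC, h1]
        rw [hl, hr]
        cases h : pvSplitC ';' t with
        | nil => exact absurd h (pvSplitC_ne_nil ';' t)
        | cons hd r =>
          rw [h] at ih
          rw [ih]
          have hc : pvSplitC ',' (',' :: hd) = [] :: pvSplitC ',' hd := by simp [pvSplitC]
          calc ([] : List Char) :: List.flatMap (pvSplitC ',') (hd :: r)
              = ([] :: pvSplitC ',' hd) ++ List.flatMap (pvSplitC ',') r := by
                simp [List.flatMap_cons]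
            _ = pvSplitC ',' (',' :: hd) ++ List.flatMap (pvSplitC ',') r := by rw [hc]
            _ = List.flatMap (pvSplitC ',') ((',' :: hd) :: r) := by rw [List.flatMap_cons]
            _ = List.flatMap (pvSplitC ',') (pvConsH ',' (hd :: r)) := rfl
      · have hl : pvSplitC ',' (c :: t.map pvSubst) = pvConsH c (pvSplitC ',' (t.map pvSubst)) := by
          simp [pvSplitC, h2]
        have hr : pvSplitC ';' (c :: t) = pvConsH c (pvSplitC ';' t) := by
          simp [pvSplitC, h1]
        rw [hl, hr]
        cases h : pvSplitC ';' t with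
        | nil => exact absurd h (pvSplitC_ne_nil ';' t)
        | cons hd r =>
          rw [h] at ih
          rw [ih]
          have hc : pvSplitC ',' (c :: hd) = pvConsH c (pvSplitC ',' hd) := by
            simp [pvSplitC, h2]
          calc pvConsH c (List.flatMap (pvSplitC ',') (hd :: r))
              = pvConsH c (pvSplitC ',' hd ++ List.flatMap (pvSplitC ',') r) := by
                rw [List.flatMap_cons]
            _ = pvConsH c (pvSplitC ',' hd) ++ List.flatMap (pvSplitC ',') r :=
                pvConsH_append c _ _ (pvSplitC_ne_nil ',' hd)
            _ = pvSplitC ',' (c :: hd) ++ List.flatMap (pvSplitC ',') r := by rw [hc]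
            _ = List.flatMap (pvSplitC ',') ((c :: hd) :: r) := by rw [List.flatMap_cons]
            _ = List.flatMap (pvSplitC ',') (pvConsH c (hd :: r)) := rfl

lemma pv_split2_eq (l : List Char) :
    pvSplit2 l = pvSplitC ',' (l.map pvSubst) := by
  induction l with
  | nil => rfl
  | cons c t ih =>
    by_cases h : c = ';' ∨ c = ','
    · rcases h with rfl | rfl
      · simp [pvSplit2, pvSplitC, pvSubst, ih]
      · simp [pvSplit2, pvSplitC, pvSubst, ih]
    · have hc1 : ¬ c = ';' := fun hh => h (Or.inl hh)
      have hc2 : ¬ c = ',' := fun hh => h (Or.inr hh)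
      have hs : pvSubst c = c := by simp [pvSubst, hc1]
      simp [pvSplit2, pvSplitC, hs, hc1, hc2, ih]

lemma pv_headD_prefix (sep : Char) (l : List Char) :
    (pvSplitC sep l).headD [] <+: l := by
  induction l with
  | nil => simp [pvSplitC]
  | cons c t ih =>
    by_cases h : c = sep
    · simp [pvSplitC, h]
    · have : pvSplitC sep (c :: t) = pvConsH c (pvSplitC sep t) := by simp [pvSplitC, h]
      rw [this]
      cases hs : pvSplitC sep t with
      | nil => exact absurd hs (pvSplitC_ne_nil sep t)
      | cons hd r =>
        rw [hs] at ih
        simpa [pvConsH] using ih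

lemma pv_mem_infix (sep : Char) (l : List Char) :
    ∀ x ∈ pvSplitC sep l, x <:+: l := by
  induction l with
  | nil => simp [pvSplitC]
  | cons c t ih =>
    intro x hx
    by_cases h : c = sep
    · have hrw : pvSplitC sep (c :: t) = [] :: pvSplitC sep t := by simp [pvSplitC, h]
      rw [hrw] at hx
      rcases List.mem_cons.mp hx with rfl | hx
      · exact List.nil_infix
      · exact (ih x hx).trans (List.infix_cons (List.infix_refl t))
    · have hrw : pvSplitC sep (c :: t) = pvConsH c (pvSplitC sep t) := by simp [pvSplitC, h]
      rw [hrw] at hx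
      cases hs : pvSplitC sep t with
      | nil => exact absurd hs (pvSplitC_ne_nil sep t)
      | cons hd r =>
        rw [hs] at hx
        simp only [pvConsH] at hx
        rcases List.mem_cons.mp hx with rfl | hx
        · have : hd <+: t := by
            have := pv_headD_prefix sep t; rw [hs] at this; simpa using this
          exact ((List.prefix_cons_inj c).mpr this).isInfix
        · exact (ih x (hs ▸ List.mem_cons_of_mem hd hx)).trans
            (List.infix_cons (List.infix_refl t))

-- the outer '"PFAM" in annot' guard is redundant: a failing guard forces an empty inner filter
lemma pv_filter_empty (a : List Char)
    (h : PySem.Chars.isIn "PFAM".toList a = false) :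
    (pvSplitC ',' a).filter pvP = [] := by
  rw [List.filter_eq_nil_iff]
  intro tok htok hP
  have h1 : ("PFAM".toList) <:+: pvHead tok :=
    (PySem.Chars.isIn_iff_infix _ _).mp (by simpa [pvP] using hP)
  have h2 : pvHead tok <+: tok := pv_headD_prefix ':' tok
  have h3 : tok <:+: a := pv_mem_infix ',' a tok htok
  have : ("PFAM".toList) <:+: a := (h1.trans h2.isInfix).trans h3
  rw [PySem.Chars.isIn_eq_false_iff] at h
  exact h this

lemma pv_strP (tok : List Char) :
    (PySem.Str.isIn "PFAM" (((PySem.Str.split? (String.ofList tok) ":").getD []).headD "")) = pvP tok := by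
  have h1 : (PySem.Str.split? (String.ofList tok) ":").getD [] =
      (pvSplitC ':' tok).map String.ofList := by
    simp [PySem.Str.split?, PySem.Chars.split?, pv_splitOn_single]
  rw [h1]
  cases hs : pvSplitC ':' tok with
  | nil => exact absurd hs (pvSplitC_ne_nil ':' tok)
  | cons hd r =>
    simp [PySem.Str.isIn, pvP, pvHead, hs]

lemma pv_strF (tok : List Char) :
    ((PySem.Str.split? (String.ofList tok) ":").getD []).getLastD "" = pvF tok := by
  have h1 : (PySem.Str.split? (String.ofList tok) ":").getD [] =
      (pvSplitC ':' tok).map String.ofList := by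
    simp [PySem.Str.split?, PySem.Chars.split?, pv_splitOn_single]
  rw [h1]
  have : ∀ (l : List (List Char)), l ≠ [] →
      (l.map String.ofList).getLastD "" = String.ofList (l.getLastD []) := by
    intro l
    induction l with
    | nil => intro h; exact absurd rfl h
    | cons h r ih =>
      intro _
      cases hr : r with
      | nil => simp
      | cons h2 r2 =>
        have := ih (by simp [hr])
        simpa [hr] using this
  rw [this _ (pvSplitC_ne_nil ':' tok)]
  rfl

lemma pv_inner (a : List Char) (acc : List String) :
    ((PySem.Str.split? (String.ofList a) ",").getD []).foldl (fun pflist pfam =>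
        if PySem.Str.isIn "PFAM" (((PySem.Str.split? pfam ":").getD []).headD "") then
          pflist ++ [((PySem.Str.split? pfam ":").getD []).getLastD ""]
        else pflist) acc
      = acc ++ ((pvSplitC ',' a).filter pvP).map pvF := by
  have h1 : (PySem.Str.split? (String.ofList a) ",").getD [] =
      (pvSplitC ',' a).map String.ofList := by
    simp [PySem.Str.split?, PySem.Chars.split?, pv_splitOn_single]
  rw [h1, List.foldl_map]
  have hstep : (fun (pflist : List String) (tok : List Char) =>
      if PySem.Str.isIn "PFAM" (((PySem.Str.split? (String.ofList tok) ":").getD []).headD "") then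
        pflist ++ [((PySem.Str.split? (String.ofList tok) ":").getD []).getLastD ""]
      else pflist)
      = fun pflist tok => if pvP tok then pflist ++ [pvF tok] else pflist := by
    funext pflist tok
    rw [pv_strP, pv_strF]
  rw [hstep]
  exact PySem.List.foldl_append_if pvP pvF (pvSplitC ',' a) acc

lemma pv_flatMap_filter_map (l : List (List Char)) :
    l.flatMap (fun a => ((pvSplitC ',' a).filter pvP).map pvF)
      = (((l.flatMap (pvSplitC ','))).filter pvP).map pvF := by
  induction l with
  | nil => simp
  | cons a t ih => simp [List.flatMap_cons, List.filter_append, List.map_append, ih]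

lemma pv_A_char (ann_str : String) :
    extract_pfam ann_str =
      (((pvSplitC ';' ann_str.toList).flatMap (pvSplitC ',')).filter pvP).map pvF := by
  rw [extract_pfam]
  have h1 : (PySem.Str.split? ann_str ";").getD [] =
      (pvSplitC ';' ann_str.toList).map String.ofList := by
    simp [PySem.Str.split?, PySem.Chars.split?, pv_splitOn_single]
  rw [h1, List.foldl_map]
  have houter : ∀ (as : List (List Char)) (acc : List String),
      as.foldl (fun pflist a =>
        if PySem.Str.isIn "PFAM" (String.ofList a) then
          ((PySem.Str.split? (String.ofList a) ",").getD []).foldl (fun pflist pfam =>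
            if PySem.Str.isIn "PFAM" (((PySem.Str.split? pfam ":").getD []).headD "") then
              pflist ++ [((PySem.Str.split? pfam ":").getD []).getLastD ""]
            else pflist) pflist
        else pflist) acc
      = acc ++ as.flatMap (fun a => ((pvSplitC ',' a).filter pvP).map pvF) := by
    intro as
    induction as with
    | nil => simp
    | cons a t ih =>
      intro acc
      simp only [List.foldl_cons, List.flatMap_cons]
      by_cases hg : PySem.Str.isIn "PFAM" (String.ofList a) = true
      · rw [if_pos hg, pv_inner, ih, List.append_assoc]
      · have hg' : PySem.Chars.isIn "PFAM".toList a = false := by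
          simp only [PySem.Str.isIn, String.toList_ofList] at hg
          exact Bool.not_eq_true _ ▸ (Bool.eq_false_iff.mpr hg)
        rw [if_neg hg, ih, pv_filter_empty a hg']
        simp
  rw [houter, List.nil_append, pv_flatMap_filter_map]

-- ------- B-side: the character machine -------

lemma pv_splitC_no_sep (sep : Char) (t : List Char) (h : ∀ c ∈ t, ¬ c = sep) :
    pvSplitC sep t = [t] := by
  induction t with
  | nil => rfl
  | cons c r ih =>
    have hc : ¬ c = sep := h c (by simp)
    have := ih (fun x hx => h x (by simp [hx]))
    simp [pvSplitC, hc, this, pvConsH]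

lemma pv_splitC_len (sep : Char) (t : List Char) (h : sep ∈ t) :
    2 ≤ (pvSplitC sep t).length := by
  induction t with
  | nil => simp at h
  | cons c r ih =>
    by_cases hc : c = sep
    · have hlen : 1 ≤ (pvSplitC sep r).length := by
        cases hr : pvSplitC sep r with
        | nil => exact absurd hr (pvSplitC_ne_nil sep r)
        | cons a b => simp
      have h2 : pvSplitC sep (c :: r) = [] :: pvSplitC sep r := by simp [pvSplitC, hc]
      rw [h2, List.length_cons]
      omega
    · have hr : sep ∈ r := by
        rcases List.mem_cons.mp h with rfl | hr
        · exact absurd rfl hc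
        · exact hr
      have := ih hr
      have hrw : pvSplitC sep (c :: r) = pvConsH c (pvSplitC sep r) := by
        simp [pvSplitC, hc]
      rw [hrw]
      cases hs : pvSplitC sep r with
      | nil => exact absurd hs (pvSplitC_ne_nil sep r)
      | cons a b =>
        rw [hs] at this
        simpa [pvConsH] using this

lemma pv_getLastD_irrel {α : Type} (r : List α) (a b : α) (h : r ≠ []) :
    r.getLastD a = r.getLastD b := by
  cases hr : r.getLast? with
  | none => exact absurd (List.getLast?_eq_none_iff.mp hr) h
  | some y => simp [List.getLastD_eq_getLast?, hr]

-- the tail register computes "after the last colon"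
lemma pv_tailF_eq (t : List Char) : ∀ acc : List Char,
    pvTailF acc t = if ':' ∈ t then (pvSplitC ':' t).getLastD [] else acc ++ t := by
  induction t with
  | nil => intro acc; simp [pvTailF]
  | cons c r ih =>
    intro acc
    by_cases hc : c = ':'
    · subst hc
      have h1 : pvTailF acc (':' :: r) = pvTailF [] r := by simp [pvTailF]
      rw [h1, ih []]
      have hmem : (':' : Char) ∈ ':' :: r := by simp
      rw [if_pos hmem]
      have hrw : pvSplitC ':' (':' :: r) = [] :: pvSplitC ':' r := by simp [pvSplitC]
      rw [hrw]
      by_cases hr : ':' ∈ r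
      · rw [if_pos hr]
        cases hs : pvSplitC ':' r with
        | nil => exact absurd hs (pvSplitC_ne_nil ':' r)
        | cons a b => simp
      · rw [if_neg hr]
        have : pvSplitC ':' r = [r] := pv_splitC_no_sep ':' r (fun x hx hxc => hr (hxc ▸ hx))
        simp [this]
    · have h1 : pvTailF acc (c :: r) = pvTailF (acc ++ [c]) r := by simp [pvTailF, hc]
      rw [h1, ih (acc ++ [c])]
      have hmem : (':' ∈ c :: r) ↔ (':' ∈ r) := by
        simp [List.mem_cons]
        intro h'; exact absurd h'.symm hc
      have hrw : pvSplitC ':' (c :: r) = pvConsH c (pvSplitC ':' r) := by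
        simp [pvSplitC, hc]
      by_cases hr : ':' ∈ r
      · rw [if_pos hr, if_pos (hmem.mpr hr), hrw]
        cases hs : pvSplitC ':' r with
        | nil => exact absurd hs (pvSplitC_ne_nil ':' r)
        | cons a b =>
          have hb : b ≠ [] := by
            have := pv_splitC_len ':' r hr
            rw [hs] at this
            simp at this
            intro hbe; rw [hbe] at this; simp at this
          simp only [pvConsH, List.getLastD_cons]
          exact (pv_getLastD_irrel b (c :: a) a hb).symm
      · rw [if_neg hr, if_neg (fun hh => hr (hmem.mp hh))]
        simp

lemma pv_tailF_last (p : List Char) : pvTailF [] p = pvLast p := by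
  rw [pv_tailF_eq p []]
  by_cases h : ':' ∈ p
  · rw [if_pos h]; rfl
  · rw [if_neg h]
    have : pvSplitC ':' p = [p] := pv_splitC_no_sep ':' p (fun x hx hxc => h (hxc ▸ hx))
    simp [pvLast, this]

lemma pv_headD_takeWhile (t : List Char) :
    (pvSplitC ':' t).headD [] = t.takeWhile (fun c => c != ':') := by
  induction t with
  | nil => rfl
  | cons c r ih =>
    by_cases hc : c = ':'
    · subst hc; simp [pvSplitC, List.takeWhile]
    · have hrw : pvSplitC ':' (c :: r) = pvConsH c (pvSplitC ':' r) := by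
        simp [pvSplitC, hc]
      rw [hrw]
      cases hs : pvSplitC ':' r with
      | nil => exact absurd hs (pvSplitC_ne_nil ':' r)
      | cons a b =>
        rw [hs] at ih
        simp only [pvConsH, List.headD_cons]
        have : (c != ':') = true := by simp [hc]
        simp [List.takeWhile, this]
        simpa using ih

-- machine state after a delimiter-free prefix p
lemma pv_state (p : List Char) : ∀ (out : List String) (h tl : List Char) (sc : Bool),
    (∀ c ∈ p, ¬(c = ';' ∨ c = ',')) →
    p.foldl pvBstep (out, h, tl, sc) =
      (out, (if sc then h else h ++ p.takeWhile (fun c => c != ':')), pvTailF tl p,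
        sc || p.any (fun c => c == ':')) := by
  induction p with
  | nil => intro out h tl sc _; simp [pvTailF]
  | cons c t ih =>
    intro out h tl sc hp
    have hcd : ¬(c = ';' ∨ c = ',') := hp c (by simp)
    have ht : ∀ x ∈ t, ¬(x = ';' ∨ x = ',') := fun x hx => hp x (by simp [hx])
    by_cases hc : c = ':'
    · subst hc
      have hstep : pvBstep (out, h, tl, sc) ':' = (out, h, [], true) := by
        simp [pvBstep]
      rw [List.foldl_cons, hstep, ih out h [] true ht]
      have h1 : pvTailF tl (':' :: t) = pvTailF [] t := by simp [pvTailF]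
      have h2 : (':' :: t).takeWhile (fun c => c != ':') = [] := by simp [List.takeWhile]
      have h3 : (':' :: t).any (fun c => c == ':') = true := by simp
      rw [h1, h2, h3]
      simp
    · have hstep : pvBstep (out, h, tl, sc) c =
          (out, (if sc then h else h ++ [c]), tl ++ [c], sc) := by
        simp [pvBstep, hcd, hc]
      rw [List.foldl_cons, hstep, ih out _ (tl ++ [c]) sc ht]
      have h1 : pvTailF tl (c :: t) = pvTailF (tl ++ [c]) t := by simp [pvTailF, hc]
      have hcb : (c != ':') = true := by simp [hc]
      have h2 : (c :: t).takeWhile (fun c => c != ':') = c :: t.takeWhile (fun c => c != ':') := by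
        simp [List.takeWhile, hcb]
      have h3 : (c :: t).any (fun c => c == ':') = t.any (fun c => c == ':') := by
        simp [hc]
      rw [h1, h2, h3]
      by_cases hsc : sc = true
      · subst hsc; simp
      · have : sc = false := Bool.eq_false_iff.mpr hsc
        subst this; simp

-- flushing a delimiter-free token p produces exactly [pvF p] when pvP p
lemma pv_flush (p : List Char) (out : List String) (d : Char)
    (hd : d = ';' ∨ d = ',') (hp : ∀ c ∈ p, ¬(c = ';' ∨ c = ',')) :
    (p ++ [d]).foldl pvBstep (out, [], [], false) =
      (out ++ (if pvP p then [pvF p] else []), [], [], false) := by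
  rw [List.foldl_append, pv_state p out [] [] false hp]
  simp only [List.foldl_cons, List.foldl_nil, if_neg (by simp : ¬ (false = true))]
  have hstep : pvBstep (out, ([] : List Char) ++ p.takeWhile (fun c => c != ':'),
      pvTailF [] p, p.any (fun c => c == ':')) d =
      ((if PySem.Str.isIn "PFAM" (String.ofList (p.takeWhile (fun c => c != ':'))) then
          out ++ [String.ofList (pvTailF [] p)] else out), [], [], false) := by
    simp [pvBstep, hd]
  simp only [Bool.false_or]
  rw [hstep]
  have hP : PySem.Str.isIn "PFAM" (String.ofList (p.takeWhile (fun c => c != ':'))) = pvP p := by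
    simp only [PySem.Str.isIn, String.toList_ofList, pvP, pvHead, pv_headD_takeWhile]
  rw [hP, pv_tailF_last]
  by_cases h : pvP p = true
  · simp [h, pvF]
  · have : pvP p = false := Bool.eq_false_iff.mpr h
    simp [this]

-- main machine lemma: running over p ++ l ++ ';' appends the flushed tokens
lemma pv_machine (l : List Char) : ∀ (p : List Char) (out : List String),
    (∀ c ∈ p, ¬(c = ';' ∨ c = ',')) →
    ((p ++ (l ++ [';'])).foldl pvBstep (out, [], [], false)).1 =
      out ++ ((pvConsA p (pvSplit2 l)).filter pvP).map pvF := by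
  induction l with
  | nil =>
    intro p out hp
    have : p ++ ([] ++ [';']) = p ++ [';'] := by simp
    rw [this, pv_flush p out ';' (Or.inl rfl) hp]
    have : pvConsA p (pvSplit2 []) = [p] := by simp [pvSplit2, pvConsA]
    rw [this]
    by_cases h : pvP p = true
    · simp [h]
    · have : pvP p = false := Bool.eq_false_iff.mpr h
      simp [this]
  | cons c t ih =>
    intro p out hp
    by_cases hc : c = ';' ∨ c = ','
    · have hsplit : p ++ ((c :: t) ++ [';']) = (p ++ [c]) ++ (t ++ [';']) := by simp
      rw [hsplit, List.foldl_append, pv_flush p out c hc hp]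
      have hih := ih [] (out ++ (if pvP p then [pvF p] else [])) (by simp)
      simp only [List.nil_append] at hih
      rw [hih, pvConsA_nil _ (pvSplit2_ne_nil t)]
      have h2 : pvSplit2 (c :: t) = [] :: pvSplit2 t := by simp [pvSplit2, hc]
      have h3 : pvConsA p ([] :: pvSplit2 t) = p :: pvSplit2 t := by simp [pvConsA]
      rw [h2, h3]
      by_cases h : pvP p = true
      · simp [h]
      · have : pvP p = false := Bool.eq_false_iff.mpr h
        simp [this]
    · have hsplit : p ++ ((c :: t) ++ [';']) = (p ++ [c]) ++ (t ++ [';']) := by simp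
      have hp' : ∀ x ∈ p ++ [c], ¬(x = ';' ∨ x = ',') := by
        intro x hx
        rcases List.mem_append.mp hx with hx | hx
        · exact hp x hx
        · simp at hx; subst hx; exact hc
      have hih := ih (p ++ [c]) out hp'
      rw [hsplit, hih]
      have h2 : pvSplit2 (c :: t) = pvConsH c (pvSplit2 t) := by simp [pvSplit2, hc]
      rw [h2]
      cases hs : pvSplit2 t with
      | nil => exact absurd hs (pvSplit2_ne_nil t)
      | cons a b => simp [pvConsA, pvConsH]

lemma pv_B_char (ann_str : String) :
    extract_pfam_alt ann_str = ((pvSplit2 ann_str.toList).filter pvP).map pvF := by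
  rw [extract_pfam_alt]
  have h0 : (ann_str ++ ";").toList = ann_str.toList ++ [';'] := by
    simp
  rw [h0]
  have := pv_machine ann_str.toList [] [] (by simp)
  simp only [List.nil_append] at this
  rw [this, pvConsA_nil _ (pvSplit2_ne_nil ann_str.toList)]

-- ===== VERDICT (by name: the statement is the Claim_ definition above) =====
theorem extract_pfam_spec : Claim_equal_extract_pfam := by
  intro ann_str _
  unfold Spec_extract_pfam
  rw [pv_A_char, pv_B_char, pv_split2_eq, pv_flatten]
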